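-- pv_equiv track=rewrite | github.com/DnineO/8-term | Защита информации/labs/lab 4 Block.py | decSBlock
-- ===== SOURCE A (Python) =====
-- list1 = [0, 1, 2, 3, 4, 5, 6, 7, 8, 9, 10, 11, 12, 13, 14, 15]
--
-- def decSBlock(convert):
--     decrypted = ""
--     num = 0
--     while num < len(convert):
--         result = ""
--         result += convert[num:num + 4]
--         decrypted += decrypt4byte(result)
--         num += 4
--     return decrypted
--
-- def decrypt4byte(text):
--     """ На вход поступают 4 бита """
--     decimal = int(text, 2)
--     for num in range(len(list1)):
--         if decimal == list1[num]:
--             result = str(bin(num))[2:].rjust(4, '0')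
--             return result
-- ===== SOURCE B (Python) =====
-- def decSBlock(convert):
--     return "".join(format(int(convert[i:i + 4], 2), '04b')
--                    for i in range(0, len(convert), 4))
-- ===== Notes on version B (the rewrite author's own statement) =====
-- stated objective: simpler
-- what changed: Each 4-bit block is formatted directly as a zero-padded 4-digit binary string inside a single join over range(0,len,4), eliminating the identity lookup table list1 and the decrypt4byte helper's inner linear scan (closed form instead of a search loop).
import Mathlib
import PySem

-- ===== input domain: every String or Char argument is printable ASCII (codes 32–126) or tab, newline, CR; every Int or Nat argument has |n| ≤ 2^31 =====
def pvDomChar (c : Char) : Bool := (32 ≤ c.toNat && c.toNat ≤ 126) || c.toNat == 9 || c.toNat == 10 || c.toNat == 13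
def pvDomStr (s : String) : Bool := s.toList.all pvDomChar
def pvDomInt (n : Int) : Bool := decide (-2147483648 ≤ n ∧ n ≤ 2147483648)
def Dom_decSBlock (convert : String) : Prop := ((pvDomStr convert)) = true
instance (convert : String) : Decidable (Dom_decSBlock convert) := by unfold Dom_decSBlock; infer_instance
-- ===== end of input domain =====

-- B formats each 4-bit block directly (format(int(block,2),'04b') joined over range(0,len,4)),
-- eliminating A's identity lookup table and its inner scan helper; same return values on Pre_.

-- ===== PORT A =====
def list1 : List Int := [0, 1, 2, 3, 4, 5, 6, 7, 8, 9, 10, 11, 12, 13, 14, 15]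

-- str.rjust(4, '0'): left-pad with '0' to length 4 (unchanged if already ≥ 4) — exact
def rjust4 (cs : List Char) : List Char := List.replicate (4 - cs.length) '0' ++ cs

-- the for-loop of decrypt4byte over range(len(list1)): the first num with decimal == list1[num]
-- returns str(bin(num))[2:].rjust(4, '0'); falling off the loop is Python's implicit None
def d4Loop (decimal : Int) : List Int → Option (List Char)
  | [] => none
  | num :: rest =>
      if decimal = PySem.List.pyGetD list1 num 0 then
        some (rjust4 (PySem.List.slice (PySem.Int.toBinChars0b num) (some 2) none))
      else d4Loop decimal rest

-- def decrypt4byte(text): int(text, 2) is PySem.Int.ofCharsBase?.  Where Python raises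
-- (ValueError from int, or TypeError at the call site when the loop falls through to None)
-- this port returns a default — Pre_decSBlock excludes exactly those inputs.
def decrypt4byte (text : List Char) : List Char :=
  let decimal := (PySem.Int.ofCharsBase? text 2).getD 0
  (d4Loop decimal (PySem.List.pyRange 0 (PySem.List.len list1) 1)).getD []

-- the while-loop of decSBlock, state (decrypted, num); num starts at 0 and only grows, so Nat is exact
def decLoop (conv : List Char) (decrypted : List Char) (num : Nat) : List Char :=
  if h : num < conv.length then
    decLoop conv
      (decrypted ++ decrypt4byte (PySem.List.slice conv (some (num : Int)) (some ((num : Int) + 4))))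
      (num + 4)
  else decrypted
termination_by conv.length - num
decreasing_by omega

def decSBlock (convert : String) : String := String.ofList (decLoop convert.toList [] 0)

-- ===== PORT B =====
-- format(v, '04b'): binary digits left-padded with '0' to width 4 — exact for 0 ≤ v (Pre_ ensures this)
def fmt04b (v : Int) : List Char :=
  let ds := PySem.Int.toBinChars v
  List.replicate (4 - ds.length) '0' ++ ds

def decSBlock_alt (convert : String) : String :=
  String.ofList (PySem.Chars.join []
    ((PySem.List.pyRange 0 (PySem.List.len convert.toList) 4).map
      (fun i =>
        fmt04b ((PySem.Int.ofCharsBase? (PySem.List.slice convert.toList (some i) (some (i + 4))) 2).getD 0))))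

-- ===== PRECONDITION & SPEC =====
-- the 4-character blocks convert[0:4], convert[4:8], … that both programs traverse
-- (structural recursion on a length fuel so that `decide` can evaluate Pre_)
def chunks4Go : Nat → List Char → List (List Char)
  | 0, _ => []
  | Nat.succ n, cs => if cs = [] then [] else cs.take 4 :: chunks4Go n (cs.drop 4)

def chunks4 (cs : List Char) : List (List Char) := chunks4Go cs.length cs

-- Pre_ excludes exactly the inputs on which A raises: some 4-character block is not a valid
-- base-2 int literal (int raises ValueError) or parses negative, outside list1 (decrypt4byte
-- then returns None and the caller raises TypeError).
def Pre_decSBlock (convert : String) : Prop :=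
  ∀ c ∈ chunks4 convert.toList,
    0 ≤ (PySem.Int.ofCharsBase? c 2).getD (-1) ∧ (PySem.Int.ofCharsBase? c 2).getD (-1) < 16
instance (convert : String) : Decidable (Pre_decSBlock convert) := by
  unfold Pre_decSBlock; infer_instance

def pvWitness_decSBlock : String := "10110100"

def Spec_decSBlock (convert : String) (out : String) : Prop := out = decSBlock_alt convert
instance (convert : String) (out : String) : Decidable (Spec_decSBlock convert out) := by
  unfold Spec_decSBlock; infer_instance

-- ===== CLAIM (what is proved, stated in full; the proofs are below) =====
def Claim_equal_decSBlock : Prop :=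
  ∀ (convert : String), Dom_decSBlock convert → Pre_decSBlock convert →
    Spec_decSBlock convert (decSBlock convert)

-- ===== LEMMAS AND PROOFS =====

-- the fuel of chunks4 is irrelevant once it covers the length
lemma chunks4Go_congr : ∀ (n m : Nat) (cs : List Char),
    cs.length ≤ n → cs.length ≤ m → chunks4Go n cs = chunks4Go m cs
  | 0, m, cs, hn, _ => by
      have : cs = [] := List.eq_nil_of_length_eq_zero (by omega)
      subst this
      cases m <;> simp [chunks4Go]
  | Nat.succ n, 0, cs, _, hm => by
      have : cs = [] := List.eq_nil_of_length_eq_zero (by omega)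
      subst this
      simp [chunks4Go]
  | Nat.succ n, Nat.succ m, cs, hn, hm => by
      by_cases h : cs = []
      · simp [chunks4Go, h]
      · simp only [chunks4Go, if_neg h]
        refine congrArg _ (chunks4Go_congr n m (cs.drop 4) ?_ ?_) <;>
          · simp only [List.length_drop]; omega

lemma chunks4_nil : chunks4 [] = [] := rfl

lemma chunks4_cons (cs : List Char) (h : cs ≠ []) :
    chunks4 cs = cs.take 4 :: chunks4 (cs.drop 4) := by
  have hl : 0 < cs.length := List.length_pos_iff.mpr h
  obtain ⟨k, hk⟩ : ∃ k, cs.length = k + 1 := ⟨cs.length - 1, by omega⟩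
  unfold chunks4
  rw [hk]
  simp only [chunks4Go, if_neg h]
  refine congrArg _ (chunks4Go_congr k (cs.drop 4).length (cs.drop 4) ?_ le_rfl)
  simp only [List.length_drop]
  omega

-- "".join is concatenation
lemma join_empty_sep : ∀ parts : List (List Char), PySem.Chars.join [] parts = parts.flatten
  | [] => by rw [PySem.Chars.join_nil]; rfl
  | [p] => by rw [PySem.Chars.join_singleton]; simp
  | p :: q :: rest => by
      rw [PySem.Chars.join_cons_cons, join_empty_sep (q :: rest)]; simp

-- A's table scan agrees with B's direct formatting on the values the table contains
lemma dec4_eq (text : List Char) (d : Int)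
    (hp : PySem.Int.ofCharsBase? text 2 = some d) (h0 : 0 ≤ d) (h16 : d < 16) :
    decrypt4byte text = fmt04b d := by
  have h : decrypt4byte text
      = (d4Loop d (PySem.List.pyRange 0 (PySem.List.len list1) 1)).getD [] := by
    simp only [decrypt4byte, hp, Option.getD_some]
  rw [h]
  interval_cases d <;> decide

-- convert[j : j+4] is a drop/take chunk
lemma slice4 {α : Type} (cs : List α) (j : Nat) :
    PySem.List.slice cs (some (j : Int)) (some ((j : Int) + 4)) = (cs.drop j).take 4 := by
  have h4 : ((j : Int) + 4) = ((j + 4 : Nat) : Int) := by push_cast; ring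
  rw [h4, PySem.List.slice_natCast]
  congr 1
  omega

-- A's while-loop produces the chunk decomposition
lemma decLoop_eq (conv : List Char) (num : Nat) (acc : List Char) :
    decLoop conv acc num = acc ++ ((chunks4 (conv.drop num)).map decrypt4byte).flatten := by
  rw [decLoop]
  split_ifs with h
  · have hne : conv.drop num ≠ [] := by
      intro hnil
      have := congrArg List.length hnil
      simp only [List.length_drop, List.length_nil] at this
      omega
    rw [decLoop_eq conv (num + 4), slice4]
    conv_rhs => rw [chunks4_cons _ hne]
    rw [List.map_cons, List.flatten_cons, List.drop_drop, List.append_assoc]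
  · have hnil : conv.drop num = [] := List.drop_eq_nil_of_le (by omega)
    rw [hnil, chunks4_nil]
    simp
termination_by conv.length - num
decreasing_by omega

-- step-4 range peeling
lemma pyRange4_nil (a b : Int) (h : b ≤ a) : PySem.List.pyRange a b 4 = [] := by
  rw [PySem.List.pyRange_of_pos a b (by norm_num), if_neg (not_lt.mpr h)]
  simp

lemma pyRange4_cons (a b : Int) (h : a < b) :
    PySem.List.pyRange a b 4 = a :: PySem.List.pyRange (a + 4) b 4 := by
  rw [PySem.List.pyRange_of_pos a b (by norm_num),
      PySem.List.pyRange_of_pos (a + 4) b (by norm_num), if_pos h]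
  have hc : ((b - a + 4 - 1) / 4).toNat
      = (if a + 4 < b then ((b - (a + 4) + 4 - 1) / 4).toNat else 0) + 1 := by
    split_ifs <;> omega
  rw [hc, List.range_succ_eq_map, List.map_cons, List.map_map]
  have hhead : (a + 4 * ((0 : Nat) : Int)) = a := by simp
  rw [hhead]
  refine congrArg _ (List.map_congr_left fun k _ => ?_)
  simp only [Function.comp_apply, Nat.succ_eq_add_one]
  push_cast
  ring

lemma pyRange4_shift (b : Int) :
    PySem.List.pyRange 4 b 4 = (PySem.List.pyRange 0 (b - 4) 4).map (fun x => x + 4) := by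
  rw [PySem.List.pyRange_of_pos 4 b (by norm_num),
      PySem.List.pyRange_of_pos 0 (b - 4) (by norm_num), List.map_map]
  have hc : (if (4 : Int) < b then ((b - 4 + 4 - 1) / 4).toNat else 0)
      = (if (0 : Int) < b - 4 then ((b - 4 - 0 + 4 - 1) / 4).toNat else 0) := by
    split_ifs <;> omega
  rw [hc]
  refine List.map_congr_left (fun k _ => ?_)
  simp only [Function.comp_apply]
  ring

-- shifting a chunk slice past the first block
lemma slice_shift4 {α : Type} (cs : List α) (i : Int) (hi : 0 ≤ i) :
    PySem.List.slice cs (some (i + 4)) (some (i + 4 + 4))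
      = PySem.List.slice (cs.drop 4) (some i) (some (i + 4)) := by
  rw [PySem.List.slice_toNat cs (by omega) (by omega),
      PySem.List.slice_toNat (cs.drop 4) hi (by omega), List.drop_drop]
  have h2 : (i + 4 + 4).toNat - (i + 4).toNat = 4 := by omega
  have h3 : (i + 4).toNat - i.toNat = 4 := by omega
  have h1 : (i + 4).toNat = 4 + i.toNat := by omega
  rw [h2, h3, h1]

-- B's comprehension over range(0, len, 4) produces the same chunk decomposition
lemma B_eq (cs : List Char) :
    ((PySem.List.pyRange 0 (PySem.List.len cs) 4).map
      (fun i =>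
        fmt04b ((PySem.Int.ofCharsBase? (PySem.List.slice cs (some i) (some (i + 4))) 2).getD 0)))
      = (chunks4 cs).map (fun c => fmt04b ((PySem.Int.ofCharsBase? c 2).getD 0)) := by
  rw [PySem.List.len_eq]
  by_cases h : cs = []
  · subst h
    rw [chunks4_nil]
    simp [pyRange4_nil 0 0 (by norm_num)]
  · have hpos : 0 < cs.length := List.length_pos_iff.mpr h
    rw [pyRange4_cons 0 (cs.length : Int) (by exact_mod_cast hpos), List.map_cons,
        chunks4_cons _ h, List.map_cons]
    have hhead : PySem.List.slice cs (some (0 : Int)) (some ((0 : Int) + 4)) = cs.take 4 := by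
      simpa using slice4 cs 0
    rw [hhead]
    refine congrArg _ ?_
    by_cases h4 : cs.length ≤ 4
    · rw [pyRange4_nil (0 + 4) (cs.length : Int) (by exact_mod_cast h4)]
      have : cs.drop 4 = [] := List.drop_eq_nil_of_le h4
      rw [this, chunks4_nil]
      simp
    · have hzero4 : (0 : Int) + 4 = 4 := by ring
      rw [hzero4, pyRange4_shift, List.map_map]
      have hlen : ((cs.length : Int) - 4) = ((cs.drop 4).length : Int) := by
        simp only [List.length_drop]
        omega
      rw [hlen]
      have hcongr :
          ((PySem.List.pyRange 0 ((cs.drop 4).length : Int) 4).map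
            ((fun i => fmt04b ((PySem.Int.ofCharsBase?
                (PySem.List.slice cs (some i) (some (i + 4))) 2).getD 0)) ∘ (fun x => x + 4)))
          = ((PySem.List.pyRange 0 ((cs.drop 4).length : Int) 4).map
            (fun i => fmt04b ((PySem.Int.ofCharsBase?
                (PySem.List.slice (cs.drop 4) (some i) (some (i + 4))) 2).getD 0))) := by
        refine List.map_congr_left (fun x hx => ?_)
        have hx0 : 0 ≤ x :=
          ((PySem.List.mem_pyRange_iff_of_pos (by norm_num) x).mp hx).1
        simp only [Function.comp_apply]
        rw [slice_shift4 cs x hx0]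
      rw [hcongr]
      have := B_eq (cs.drop 4)
      rw [PySem.List.len_eq] at this
      exact this
termination_by cs.length
decreasing_by
  simp only [List.length_drop]
  omega

-- ===== VERDICT (by name: the statement is the Claim_ definition above) =====
theorem decSBlock_spec : Claim_equal_decSBlock := by
  intro convert _hDom hPre
  unfold Spec_decSBlock decSBlock decSBlock_alt
  refine congrArg String.ofList ?_
  rw [decLoop_eq convert.toList 0 [], List.drop_zero, List.nil_append,
      join_empty_sep, B_eq]
  refine congrArg List.flatten (List.map_congr_left (fun c hc => ?_))
  obtain ⟨h0, h16⟩ := hPre c hc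
  cases hp : PySem.Int.ofCharsBase? c 2 with
  | none => rw [hp] at h0; simp at h0
  | some d =>
      rw [hp] at h0 h16
      simp only [Option.getD_some] at h0 h16 ⊢
      exact dec4_eq c d hp h0 h16
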